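-- pv_equiv track=rewrite | github.com/wanglei99999/smolagents-learning | src/smolagents/local_python_executor.py | check_import_authorized
-- ===== SOURCE A (Python) =====
-- from typing import Any
--
-- def build_import_tree(authorized_imports: list[str]) -> dict[str, Any]:
--     tree = {}
--     for import_path in authorized_imports:
--         parts = import_path.split(".")
--         current = tree
--         for part in parts:
--             if part not in current:
--                 current[part] = {}
--             current = current[part]
--     return tree
--
-- def check_import_authorized(import_to_check: str, authorized_imports: list[str]) -> bool:
--     current_node = build_import_tree(authorized_imports)
--     for part in import_to_check.split("."):
--         if "*" in current_node:
--             return True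
--         if part not in current_node:
--             return False
--         current_node = current_node[part]
--     return True
-- ===== SOURCE B (Python) =====
-- def check_import_authorized(import_to_check: str, authorized_imports: list[str]) -> bool:
--     t = import_to_check.split(".")
--     for a_str in authorized_imports:
--         a = a_str.split(".")
--         if a[: len(t)] == t:
--             return True
--         if any(a[:j] == t[:j] and len(a) > j and a[j] == "*" for j in range(len(t))):
--             return True
--     return False
-- ===== Notes on version B (the rewrite author's own statement) =====
-- stated objective: simpler
-- what changed: Replaces A's build-a-nested-dict-tree-then-walk with a single linear scan over authorized_imports, testing each entry directly for a component-prefix match or a wildcard match.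
import Mathlib
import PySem

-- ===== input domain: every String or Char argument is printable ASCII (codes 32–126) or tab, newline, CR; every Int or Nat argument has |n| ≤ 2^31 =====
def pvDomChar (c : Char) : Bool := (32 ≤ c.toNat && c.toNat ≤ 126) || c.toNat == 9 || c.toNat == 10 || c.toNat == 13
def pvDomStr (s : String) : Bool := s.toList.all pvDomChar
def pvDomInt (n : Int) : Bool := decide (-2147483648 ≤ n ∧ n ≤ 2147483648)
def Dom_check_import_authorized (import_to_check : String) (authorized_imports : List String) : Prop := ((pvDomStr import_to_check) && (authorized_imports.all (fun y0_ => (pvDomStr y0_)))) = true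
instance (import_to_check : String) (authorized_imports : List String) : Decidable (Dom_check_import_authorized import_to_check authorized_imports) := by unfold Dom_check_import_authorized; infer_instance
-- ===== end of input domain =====

-- ===== PORT A =====
-- B replaces A's build-tree-then-walk with a single linear scan over the authorized list (objective: simpler).

-- Python's nested dict[str, Any] tree: a node's children as an ordered association structure
-- (key, child subtree, rest of the siblings); `nil` is the empty dict {}.
inductive PTree where
  | nil : PTree
  | cons : String → PTree → PTree → PTree
deriving DecidableEq, Repr

-- `part in current` / `current[part]` on a dict node
def ptLookup : PTree → String → Option PTree
  | .nil, _ => none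
  | .cons k c r, p => if k = p then some c else ptLookup r p

-- the inner loop of build_import_tree: `if part not in current: current[part] = {}`
-- (new key appended at the end, Python dict insertion order) then `current = current[part]`,
-- expressed as the functional in-place update along the path
def ptAdd : PTree → List String → PTree
  | t, [] => t
  | .nil, p :: ps => .cons p (ptAdd .nil ps) .nil
  | .cons k c r, p :: ps =>
    if k = p then .cons k (ptAdd c ps) r else .cons k c (ptAdd r (p :: ps))

def build_import_tree (authorized_imports : List String) : PTree :=
  authorized_imports.foldl
    (fun tree import_path => ptAdd tree ((PySem.Str.split? import_path ".").getD [])) .nil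

-- the walking loop of check_import_authorized
def walkTree : PTree → List String → Bool
  | _, [] => true
  | current_node, part :: rest =>
    if (ptLookup current_node "*").isSome then true
    else match ptLookup current_node part with
      | none => false
      | some c => walkTree c rest

def check_import_authorized (import_to_check : String) (authorized_imports : List String) : Bool :=
  walkTree (build_import_tree authorized_imports) ((PySem.Str.split? import_to_check ".").getD [])

-- ===== PORT B =====
def check_import_authorized_alt (import_to_check : String) (authorized_imports : List String) : Bool :=
  let t := (PySem.Str.split? import_to_check ".").getD []
  authorized_imports.any (fun a_str =>
    let a := (PySem.Str.split? a_str ".").getD []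
    (a.take t.length == t) ||
    (List.range t.length).any (fun j =>
      (a.take j == t.take j) && decide (j < a.length) && (a.getD j "" == "*")))

-- ===== PRECONDITION & SPEC =====
def Spec_check_import_authorized (import_to_check : String) (authorized_imports : List String) (out : Bool) : Prop := out = check_import_authorized_alt import_to_check authorized_imports
instance (import_to_check : String) (authorized_imports : List String) (out : Bool) : Decidable (Spec_check_import_authorized import_to_check authorized_imports out) := by unfold Spec_check_import_authorized; infer_instance

-- ===== CLAIM (what is proved, stated in full; the proofs are below) =====
def Claim_equal_check_import_authorized : Prop := ∀ (import_to_check : String) (authorized_imports : List String), Dom_check_import_authorized import_to_check authorized_imports → Spec_check_import_authorized import_to_check authorized_imports (check_import_authorized import_to_check authorized_imports)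

-- ===== LEMMAS AND PROOFS =====

-- path membership in the tree: does the tree contain this chain of keys?
def hasPath : PTree → List String → Bool
  | _, [] => true
  | t, p :: ps => match ptLookup t p with
    | none => false
    | some c => hasPath c ps

theorem ptLookup_ptAdd (p y : String) (ps : List String) : ∀ (t : PTree),
    ptLookup (ptAdd t (p :: ps)) y =
      if y = p then some (ptAdd ((ptLookup t p).getD .nil) ps) else ptLookup t y := by
  intro t
  induction t with
  | nil =>
    by_cases h : y = p
    · subst h; simp [ptAdd, ptLookup]
    · simp [ptAdd, ptLookup, h, Ne.symm h]
  | cons k c r ihc ihr =>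
    by_cases hkp : k = p
    · subst hkp
      by_cases hyk : y = k
      · subst hyk; simp [ptAdd, ptLookup]
      · simp [ptAdd, ptLookup, hyk, Ne.symm hyk]
    · by_cases hyp : y = p
      · subst hyp
        have hky : ¬ k = y := hkp
        simp [ptAdd, hkp, ptLookup, ihr]
      · by_cases hky : k = y
        · subst hky; simp [ptAdd, hkp, ptLookup]
        · simp [ptAdd, hkp, ptLookup, hky, ihr, hyp]

theorem hasPath_nil_cons (p : String) (ps : List String) : hasPath .nil (p :: ps) = false := by
  simp [hasPath, ptLookup]

theorem hasPath_nil_append_singleton (l : List String) (x : String) :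
    hasPath .nil (l ++ [x]) = false := by
  cases l <;> simp [hasPath_nil_cons]

theorem hasPath_ptAdd (q : List String) : ∀ (t : PTree) (a : List String),
    hasPath (ptAdd t a) q = (hasPath t q || (a.take q.length == q)) := by
  induction q with
  | nil => intro t a; simp [hasPath]
  | cons x qs ih =>
    intro t a
    cases a with
    | nil => simp [ptAdd]
    | cons p ps =>
      by_cases hxp : x = p
      · subst hxp
        cases hl : ptLookup t x with
        | some c => simp [hasPath, ptLookup_ptAdd, hl, ih]
        | none =>
          have h1 : hasPath (ptAdd t (x :: ps)) (x :: qs) = hasPath (ptAdd PTree.nil ps) qs := by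
            simp [hasPath, ptLookup_ptAdd, hl]
          have h2 : hasPath t (x :: qs) = false := by simp [hasPath, hl]
          rw [h1, ih, h2]
          cases qs with
          | nil => simp [hasPath]
          | cons y ys => simp [hasPath_nil_cons]
      · simp [hasPath, ptLookup_ptAdd, Ne.symm hxp, hxp]

theorem hasPath_foldl (q : List String) : ∀ (L : List String) (t : PTree),
    hasPath (L.foldl (fun tree s => ptAdd tree ((PySem.Str.split? s ".").getD [])) t) q
      = (hasPath t q || L.any (fun s => ((PySem.Str.split? s ".").getD []).take q.length == q)) := by
  intro L
  induction L with
  | nil => intro t; simp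
  | cons s L' ih => intro t; simp [List.foldl_cons, ih, hasPath_ptAdd, Bool.or_assoc]

theorem walkTree_char (parts : List String) : ∀ (t : PTree),
    walkTree t parts =
      ((List.range parts.length).any (fun j => hasPath t (parts.take j ++ ["*"])) || hasPath t parts) := by
  induction parts with
  | nil => intro t; simp [walkTree, hasPath]
  | cons p ps ih =>
    intro t
    simp only [List.length_cons]
    rw [List.range_succ_eq_map]
    simp only [walkTree, List.any_cons, List.any_map, Function.comp_def,
      List.take_succ_cons, List.take_zero, List.nil_append, List.cons_append, hasPath]
    cases hsl : ptLookup t "*" with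
    | some c0 => simp
    | none =>
      simp only [Option.isSome_none, Bool.false_eq_true, if_false, Bool.false_or]
      cases hl : ptLookup t p with
      | none => simp
      | some c => simp [ih c]

theorem take_succ_wild (j : Nat) : ∀ (a P : List String), P.length = j →
    ((a.take (j + 1) = P ++ ["*"]) ↔ (a.take j = P ∧ j < a.length ∧ a.getD j "" = "*")) := by
  induction j with
  | zero =>
    intro a P hP
    rw [List.length_eq_zero_iff] at hP; subst hP
    cases a <;> simp
  | succ n ih =>
    intro a P hP
    cases P with
    | nil => simp at hP
    | cons x P' =>
      cases a with
      | nil => simp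
      | cons y a' =>
        simp only [List.take_succ_cons, List.cons_append, List.cons.injEq, List.length_cons,
          Nat.add_lt_add_iff_right, List.getD_cons_succ]
        rw [ih a' P' (by simpa using hP)]
        tauto

theorem go_ne_nil (sep : List Char) : ∀ (fuel : Nat) (l cur : List Char)
    (acc : List (List Char)), PySem.Chars.splitOn.go sep fuel l cur acc ≠ [] := by
  intro fuel
  induction fuel with
  | zero => intro l cur acc; simp [PySem.Chars.splitOn.go]
  | succ n ih =>
    intro l cur acc
    cases l with
    | nil => simp [PySem.Chars.splitOn.go]
    | cons c rest =>
      rw [PySem.Chars.splitOn.go]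
      split_ifs with h
      · exact ih _ _ _
      · exact ih _ _ _

theorem split_dot_ne_nil (s : String) : (PySem.Str.split? s ".").getD [] ≠ [] := by
  simp [PySem.Str.split?, PySem.Chars.split?, PySem.Chars.splitOn]
  intro h
  exact go_ne_nil _ _ _ _ _ h

theorem main_eq (itc : String) (auth : List String) :
    check_import_authorized itc auth = check_import_authorized_alt itc auth := by
  unfold check_import_authorized check_import_authorized_alt build_import_tree
  rw [walkTree_char]
  simp only [hasPath_foldl, hasPath_nil_append_singleton, Bool.false_or]
  have ht : (PySem.Str.split? itc ".").getD [] ≠ [] := split_dot_ne_nil itc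
  set t : List String := (PySem.Str.split? itc ".").getD [] with hdef
  have hnil : hasPath .nil t = false := by
    rcases List.exists_cons_of_ne_nil ht with ⟨p, ps, hpe⟩
    rw [hpe]; exact hasPath_nil_cons p ps
  rw [hnil]
  simp only [Bool.false_or]
  have hb : ∀ j, j < t.length → ∀ (a : List String),
      ((a.take (t.take j ++ ["*"]).length = t.take j ++ ["*"]) ↔
        (a.take j = t.take j ∧ j < a.length ∧ a.getD j "" = "*")) := by
    intro j hj a
    have hlen : (t.take j ++ ["*"]).length = j + 1 := by
      simp [List.length_take, Nat.min_eq_left (le_of_lt hj)]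
    rw [hlen]
    exact take_succ_wild j a (t.take j) (by simp [List.length_take, le_of_lt hj])
  rw [Bool.eq_iff_iff]
  simp only [Bool.or_eq_true, List.any_eq_true, List.mem_range, beq_iff_eq,
    Bool.and_eq_true, decide_eq_true_eq]
  constructor
  · rintro (⟨j, hj, s, hs, he⟩ | ⟨s, hs, hg⟩)
    · exact ⟨s, hs, Or.inr ⟨j, hj, by
        rcases (hb j hj _).mp he with ⟨h1, h2, h3⟩; exact ⟨⟨h1, h2⟩, h3⟩⟩⟩
    · exact ⟨s, hs, Or.inl hg⟩
  · rintro ⟨s, hs, (hg | ⟨j, hj, ⟨h1, h2⟩, h3⟩)⟩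
    · exact Or.inr ⟨s, hs, hg⟩
    · exact Or.inl ⟨j, hj, s, hs, (hb j hj _).mpr ⟨h1, h2, h3⟩⟩

-- ===== VERDICT (by name: the statement is the Claim_ definition above) =====
theorem check_import_authorized_spec : Claim_equal_check_import_authorized := by
  intro itc auth _
  unfold Spec_check_import_authorized
  exact main_eq itc auth
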